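-- pv_equiv track=rewrite | github.com/torrvision/seqtrack | seqtrack/helpers.py | unique_value
-- ===== SOURCE A (Python) =====
-- def unique_value(elems):
--     '''Returns the single element which is repeated in elems.
--
--     Raises an exception if elems is empty or contains diverse elements.
--     '''
--     first = None
--     i = 0
--     for x in elems:
--         if i == 0:
--             first = x
--         else:
--             assert x == first, 'element {} not equal: {} != {}'.format(i, x, first)
--         i += 1
--     if i == 0:
--         raise ValueError('empty collection')
--     return first
-- ===== SOURCE B (Python) =====
-- def unique_value(elems):
--     '''Returns the single element which is repeated in elems.
--
--     Raises an exception if elems is empty or contains diverse elements.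
--     '''
--     distinct = set(elems)
--     if not distinct:
--         raise ValueError('empty collection')
--     assert len(distinct) == 1, 'diverse elements: {}'.format(sorted(distinct))
--     (value,) = distinct
--     return value
-- ===== Notes on version B (the rewrite author's own statement) =====
-- stated objective: alternative
-- what changed: B deduplicates the whole collection into a hash set and demands the set be a singleton, instead of A's one-pass loop asserting each element equals the first; the equality checks and index bookkeeping disappear into set construction.
import Mathlib
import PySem

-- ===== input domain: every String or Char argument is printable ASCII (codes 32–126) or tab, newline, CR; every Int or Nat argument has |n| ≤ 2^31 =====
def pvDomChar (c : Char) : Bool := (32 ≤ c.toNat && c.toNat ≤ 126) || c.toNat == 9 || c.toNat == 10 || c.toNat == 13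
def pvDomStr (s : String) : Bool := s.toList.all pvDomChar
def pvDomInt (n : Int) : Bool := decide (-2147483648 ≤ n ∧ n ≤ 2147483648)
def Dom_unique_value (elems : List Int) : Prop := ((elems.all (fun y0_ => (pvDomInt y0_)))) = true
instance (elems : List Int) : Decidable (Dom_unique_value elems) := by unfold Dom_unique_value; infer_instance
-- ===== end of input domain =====

-- B deduplicates into a set and requires a singleton, replacing A's one-pass first/index loop; equivalence is about the RETURN value on inputs where A returns (non-empty, all elements equal).

-- ===== PORT A =====
-- A's loop state: (first : Option Int, i : Nat); the in-loop assert only raises, which Pre_ excludes.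
def uvStep (st : Option Int × Nat) (x : Int) : Option Int × Nat :=
  if st.2 = 0 then (some x, st.2 + 1) else (st.1, st.2 + 1)

def unique_value (elems : List Int) : Int :=
  let s := elems.foldl uvStep (none, 0)
  if s.2 = 0 then 0          -- ValueError 'empty collection' path, excluded by Pre_
  else s.1.getD 0

-- ===== PORT B =====
def unique_value_alt (elems : List Int) : Int :=
  match PySem.Set.ofList elems with
  | [v] => v                 -- the singleton set: its sole element
  | _ => 0                   -- empty (ValueError) or diverse (AssertionError) paths, excluded by Pre_

-- ===== PRECONDITION & SPEC =====
-- Pre_ excludes exactly the inputs where A raises: the empty list (ValueError) and lists with a differing element (AssertionError).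
def Pre_unique_value (elems : List Int) : Prop :=
  elems ≠ [] ∧ (elems.all (fun x => x == elems.headI)) = true
instance (elems : List Int) : Decidable (Pre_unique_value elems) := by unfold Pre_unique_value; infer_instance
def pvWitness_unique_value : List Int := [7, 7, 7]

def Spec_unique_value (elems : List Int) (out : Int) : Prop := out = unique_value_alt elems
instance (elems : List Int) (out : Int) : Decidable (Spec_unique_value elems out) := by unfold Spec_unique_value; infer_instance

-- ===== CLAIM (what is proved, stated in full; the proofs are below) =====
def Claim_equal_unique_value : Prop := ∀ (elems : List Int), Dom_unique_value elems → Pre_unique_value elems → Spec_unique_value elems (unique_value elems)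

-- ===== LEMMAS AND PROOFS =====
theorem uv_foldl_const (t : List Int) (h : Int) (n : Nat) :
    t.foldl uvStep (some h, n + 1) = (some h, n + 1 + t.length) := by
  induction t generalizing n with
  | nil => simp
  | cons x t ih =>
    simp only [List.foldl_cons, uvStep, List.length_cons]
    rw [if_neg (by omega)]
    simpa [Nat.add_assoc, Nat.add_comm, Nat.add_left_comm] using ih (n + 1)

theorem set_foldl_add_const (t : List Int) (h : Int) (hall : ∀ x ∈ t, x = h) :
    t.foldl PySem.Set.add [h] = [h] := by
  induction t with
  | nil => rfl
  | cons x t ih =>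
    have hx := hall x (List.mem_cons_self ..)
    rw [List.foldl_cons, hx, show PySem.Set.add [h] h = [h] by
      simp [PySem.Set.add, PySem.Set.contains]]
    exact ih (fun y hy => hall y (List.mem_cons_of_mem _ hy))

-- ===== VERDICT (by name: the statement is the Claim_ definition above) =====
theorem unique_value_spec : Claim_equal_unique_value := by
  intro elems _ hpre
  obtain ⟨hne, hall⟩ := hpre
  cases elems with
  | nil => exact absurd rfl hne
  | cons h t =>
    simp only [List.headI, List.all_cons, Bool.and_eq_true, beq_iff_eq] at hall
    have hall' : ∀ x ∈ t, x = h := by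
      intro x hx
      have := List.all_eq_true.mp hall.2 x hx
      exact beq_iff_eq.mp this
    unfold Spec_unique_value unique_value unique_value_alt
    rw [List.foldl_cons, show uvStep (none, 0) h = (some h, 0 + 1) from rfl, uv_foldl_const]
    rw [PySem.Set.ofList_eq_foldl, List.foldl_cons,
      show PySem.Set.add [] h = [h] from rfl, set_foldl_add_const t h hall']
    simp
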